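-- pv_equiv track=rewrite | github.com/JuanIgnacioOchoa/Practice_Algorythms | Google/CodeJam2022/3D Printing/main.py | inkUsage
-- ===== SOURCE A (Python) =====
-- inkSize = pow(10, 6)
--
-- def inkUsage(inks):
--     for i in inks:
--         if sum(i) < inkSize:
--             return 'IMPOSSIBLE'
--     C = min([inks[0][0], inks[1][0], inks[2][0]])
--     M = min([inks[0][1], inks[1][1], inks[2][1]])
--     Y = min([inks[0][2], inks[1][2], inks[2][2]])
--     K = min([inks[0][3], inks[1][3], inks[2][3]])
--     minInks = [C, M, Y, K]
--     totalInk = sum(minInks)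
--     if totalInk < inkSize:
--         return 'IMPOSSIBLE'
--     else:
--         diff = totalInk - inkSize
--         if diff != 0:
--             i = 0
--             while diff != 0 and i < len(minInks):
--                 if (minInks[i] - diff) < 0:
--                     diff -= minInks[i]
--                     minInks[i] = 0
--                 else:
--                     minInks[i] = minInks[i] - diff
--                     diff = 0
--                 i += 1
--             if i > len(minInks) and diff != 0:
--                 return 'IMPOSSIBLE'
--     return "" + str(minInks[0]) + " " + str(minInks[1]) + " " + str(minInks[2]) + " " + str(minInks[3])
-- ===== SOURCE B (Python) =====
-- inkSize = pow(10, 6)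
--
-- def inkUsage(inks):
--     if any(sum(r) < inkSize for r in inks):
--         return 'IMPOSSIBLE'
--     mins = [min(inks[0][j], inks[1][j], inks[2][j]) for j in range(4)]
--     if sum(mins) < inkSize:
--         return 'IMPOSSIBLE'
--     out = [0, 0, 0, 0]
--     remaining = inkSize
--     for j in (3, 2, 1, 0):
--         out[j] = min(mins[j], remaining)
--         remaining -= out[j]
--     return " ".join(str(v) for v in out)
-- ===== Notes on version B (the rewrite author's own statement) =====
-- stated objective: alternative
-- what changed: The surplus is no longer subtracted forward with a branching while-loop that mutates minInks; instead B distributes the inkSize budget back-to-front (out[j] = min(mins[j], remaining)), computes the channel minima with a comprehension, uses any() for the feasibility scan, and joins the output with ' '.join.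
import Mathlib
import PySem

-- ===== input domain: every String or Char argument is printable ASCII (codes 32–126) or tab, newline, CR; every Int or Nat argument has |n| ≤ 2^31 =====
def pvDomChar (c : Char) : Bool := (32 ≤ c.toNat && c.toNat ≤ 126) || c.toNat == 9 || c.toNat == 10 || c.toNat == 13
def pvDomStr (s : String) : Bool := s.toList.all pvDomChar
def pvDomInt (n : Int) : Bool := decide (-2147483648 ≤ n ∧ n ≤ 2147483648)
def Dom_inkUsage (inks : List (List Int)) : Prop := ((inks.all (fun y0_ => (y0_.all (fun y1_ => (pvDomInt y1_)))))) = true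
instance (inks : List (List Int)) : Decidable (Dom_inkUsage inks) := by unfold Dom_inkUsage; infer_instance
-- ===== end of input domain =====

-- B replaces A's forward surplus-subtraction while-loop by a back-to-front budget
-- allocation (out[j] = min(mins[j], remaining)); objective: alternative (same cost).

-- ===== PORT A =====
def inkSize : Int := 1000000  -- inkSize = pow(10, 6)

-- inks[r][c]; exact for in-range indices (out-of-range = IndexError, excluded by Pre_)
def getA (inks : List (List Int)) (r c : Int) : Int :=
  PySem.List.pyGetD (PySem.List.pyGetD inks r []) c 0

-- 'for i in inks: if sum(i) < inkSize: return IMPOSSIBLE' (true = early return hit)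
def checkRowsA : List (List Int) → Bool
  | [] => false
  | r :: rs => if r.sum < inkSize then true else checkRowsA rs

-- the while-loop: state (minInks, diff, i); minInks[i] exact for i < len
def loopA (m : List Int) (diff : Int) (i : Nat) : List Int × Int × Nat :=
  if diff = 0 then (m, diff, i)
  else if h : i < m.length then
    if m.getD i 0 - diff < 0 then loopA (m.set i 0) (diff - m.getD i 0) (i + 1)
    else loopA (m.set i (m.getD i 0 - diff)) 0 (i + 1)
  else (m, diff, i)
termination_by m.length - i
decreasing_by all_goals simp [List.length_set]; omega

-- "" + str(minInks[0]) + " " + … (in-range indices)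
def fmtA (m : List Int) : String :=
  "" ++ PySem.Int.toStr (PySem.List.pyGetD m 0 0) ++ " " ++ PySem.Int.toStr (PySem.List.pyGetD m 1 0)
     ++ " " ++ PySem.Int.toStr (PySem.List.pyGetD m 2 0) ++ " " ++ PySem.Int.toStr (PySem.List.pyGetD m 3 0)

def inkUsage (inks : List (List Int)) : String :=
  if checkRowsA inks then "IMPOSSIBLE"
  else
    let C := min (min (getA inks 0 0) (getA inks 1 0)) (getA inks 2 0)
    let M := min (min (getA inks 0 1) (getA inks 1 1)) (getA inks 2 1)
    let Y := min (min (getA inks 0 2) (getA inks 1 2)) (getA inks 2 2)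
    let K := min (min (getA inks 0 3) (getA inks 1 3)) (getA inks 2 3)
    let minInks := [C, M, Y, K]
    let totalInk := minInks.sum
    if totalInk < inkSize then "IMPOSSIBLE"
    else
      let diff := totalInk - inkSize
      if diff ≠ 0 then
        let res := loopA minInks diff 0
        if res.2.2 > res.1.length ∧ res.2.1 ≠ 0 then "IMPOSSIBLE" else fmtA res.1
      else fmtA minInks

-- ===== PORT B =====
-- min(inks[0][j], inks[1][j], inks[2][j])
def minColB (inks : List (List Int)) (j : Int) : Int :=
  min (min (PySem.List.pyGetD (PySem.List.pyGetD inks 0 []) j 0)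
           (PySem.List.pyGetD (PySem.List.pyGetD inks 1 []) j 0))
      (PySem.List.pyGetD (PySem.List.pyGetD inks 2 []) j 0)

def inkUsage_alt (inks : List (List Int)) : String :=
  if inks.any (fun r => r.sum < inkSize) then "IMPOSSIBLE"
  else
    let mins := (PySem.List.pyRange 0 4 1).map (fun j => minColB inks j)
    if mins.sum < inkSize then "IMPOSSIBLE"
    else
      -- for j in (3,2,1,0): out[j] = min(mins[j], remaining); remaining -= out[j]
      -- (j is a nonneg in-range literal, so 'out[j] = …' is .set j.toNat, exact)
      let st := ([3, 2, 1, 0] : List Int).foldl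
        (fun (st : List Int × Int) j =>
          let v := min (PySem.List.pyGetD mins j 0) st.2
          (st.1.set j.toNat v, st.2 - v))
        ([0, 0, 0, 0], inkSize)
      PySem.Str.join " " (st.1.map (fun v => PySem.Int.toStr v))

-- ===== PRECONDITION & SPEC =====
-- Pre_ excludes (a) inputs where A raises IndexError (fewer than 3 rows, or one of the
-- first 3 rows with fewer than 4 entries, when no row's sum triggers the early
-- IMPOSSIBLE), and (b) inputs carrying a NEGATIVE amount among the twelve entries A
-- reads: ink amounts are nonnegative in this problem, and on negatives A's forward
-- subtraction returns an accidental allocation (see cites).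
def Pre_inkUsage (inks : List (List Int)) : Prop :=
  (∃ r ∈ inks, r.sum < 1000000) ∨
  (3 ≤ inks.length ∧ ∀ r ∈ inks.take 3, 4 ≤ r.length ∧ ∀ x ∈ r.take 4, 0 ≤ x)
instance (inks : List (List Int)) : Decidable (Pre_inkUsage inks) := by
  unfold Pre_inkUsage; infer_instance

def pvWitness_inkUsage : List (List Int) :=
  [[1000000, 0, 0, 0], [1000000, 0, 0, 0], [1000000, 0, 0, 0]]

def Spec_inkUsage (inks : List (List Int)) (out : String) : Prop := out = inkUsage_alt inks
instance (inks : List (List Int)) (out : String) : Decidable (Spec_inkUsage inks out) := by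
  unfold Spec_inkUsage; infer_instance

-- ===== CLAIM (what is proved, stated in full; the proofs are below) =====
def Claim_equal_inkUsage : Prop :=
  ∀ (inks : List (List Int)), Dom_inkUsage inks → Pre_inkUsage inks →
    Spec_inkUsage inks (inkUsage inks)

-- ===== LEMMAS AND PROOFS =====
theorem str_eq_of_toList {s t : String} (h : s.toList = t.toList) : s = t := by
  rw [← String.ofList_toList (s := s), h, String.ofList_toList]

theorem joinB (a b c d : String) :
    PySem.Str.join " " [a, b, c, d] = "" ++ a ++ " " ++ b ++ " " ++ c ++ " " ++ d := by
  apply str_eq_of_toList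
  simp [PySem.Str.join, PySem.Chars.join, List.intercalate, String.toList_append]

theorem fmt_join (a b c d : Int) :
    PySem.Str.join " " (([a, b, c, d]).map (fun v => PySem.Int.toStr v)) = fmtA [a, b, c, d] := by
  simp only [List.map_cons, List.map_nil, joinB, fmtA]
  simp [pysem]

theorem checkRowsA_eq_any (inks : List (List Int)) :
    checkRowsA inks = inks.any (fun r => r.sum < inkSize) := by
  induction inks with
  | nil => rfl
  | cons r rs ih => by_cases h : r.sum < inkSize <;> simp [checkRowsA, h, ih]

theorem loopA_1 (C M Y K diff : Int) (h1 : 0 < diff) (h2 : ¬ (C - diff < 0)) :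
    loopA [C, M, Y, K] diff 0 = ([C - diff, M, Y, K], 0, 1) := by
  rw [loopA]; rw [if_neg (by omega)]; rw [dif_pos (by simp)]
  simp only [List.getD_cons_zero]
  rw [if_neg h2]
  rw [loopA]; simp

theorem loopA_2 (C M Y K diff : Int) (h1 : C - diff < 0) (h2 : 0 < diff)
    (h3 : ¬ (M - (diff - C) < 0)) :
    loopA [C, M, Y, K] diff 0 = ([0, M - (diff - C), Y, K], 0, 2) := by
  rw [loopA]; rw [if_neg (by omega)]; rw [dif_pos (by simp)]
  simp only [List.getD_cons_zero]
  rw [if_pos h1]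
  rw [loopA]; rw [if_neg (by omega)]; rw [dif_pos (by simp)]
  simp only [List.set_cons_zero, List.getD_cons_succ, List.getD_cons_zero]
  rw [if_neg h3]
  rw [loopA]; simp

theorem loopA_3 (C M Y K diff : Int) (h0 : 0 < diff) (h1 : C - diff < 0)
    (h2 : M - (diff - C) < 0) (h3 : ¬ (Y - (diff - C - M) < 0)) :
    loopA [C, M, Y, K] diff 0 = ([0, 0, Y - (diff - C - M), K], 0, 3) := by
  rw [loopA]; rw [if_neg (by omega)]; rw [dif_pos (by simp)]
  simp only [List.getD_cons_zero]
  rw [if_pos h1]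
  rw [loopA]; rw [if_neg (by omega)]; rw [dif_pos (by simp)]
  simp only [List.set_cons_zero, List.getD_cons_succ, List.getD_cons_zero]
  rw [if_pos h2]
  rw [loopA]; rw [if_neg (by omega)]; rw [dif_pos (by simp)]
  simp only [List.set_cons_zero, List.set_cons_succ, List.getD_cons_succ, List.getD_cons_zero]
  rw [if_neg (by omega)]
  rw [loopA]; simp

theorem loopA_4 (C M Y K diff : Int) (h0 : 0 < diff) (h1 : C - diff < 0)
    (h2 : M - (diff - C) < 0) (h3 : Y - (diff - C - M) < 0)
    (h4 : ¬ (K - (diff - C - M - Y) < 0)) :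
    loopA [C, M, Y, K] diff 0 = ([0, 0, 0, K - (diff - C - M - Y)], 0, 4) := by
  rw [loopA]; rw [if_neg (by omega)]; rw [dif_pos (by simp)]
  simp only [List.getD_cons_zero]
  rw [if_pos h1]
  rw [loopA]; rw [if_neg (by omega)]; rw [dif_pos (by simp)]
  simp only [List.set_cons_zero, List.getD_cons_succ, List.getD_cons_zero]
  rw [if_pos h2]
  rw [loopA]; rw [if_neg (by omega)]; rw [dif_pos (by simp)]
  simp only [List.set_cons_zero, List.set_cons_succ, List.getD_cons_succ, List.getD_cons_zero]
  rw [if_pos h3]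
  rw [loopA]; rw [if_neg (by omega)]; rw [dif_pos (by simp)]
  simp only [List.set_cons_zero, List.set_cons_succ, List.getD_cons_succ, List.getD_cons_zero]
  rw [if_neg (by omega)]
  rw [loopA]; simp

theorem foldB_eval (C M Y K : Int) :
    (([3, 2, 1, 0] : List Int).foldl
        (fun (st : List Int × Int) j =>
          let v := min (PySem.List.pyGetD [C, M, Y, K] j 0) st.2
          (st.1.set j.toNat v, st.2 - v))
        ([0, 0, 0, 0], inkSize)).1 =
      [min C (inkSize - min K inkSize - min Y (inkSize - min K inkSize) -
          min M (inkSize - min K inkSize - min Y (inkSize - min K inkSize))),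
       min M (inkSize - min K inkSize - min Y (inkSize - min K inkSize)),
       min Y (inkSize - min K inkSize),
       min K inkSize] := by
  simp [List.foldl, pysem, List.set]

theorem main_core (C M Y K : Int) (hC : 0 ≤ C) (hM : 0 ≤ M) (hY : 0 ≤ Y) (hK : 0 ≤ K)
    (hS : inkSize ≤ C + M + Y + K) :
    (let minInks := [C, M, Y, K]
     let diff := C + M + Y + K - inkSize
     if diff ≠ 0 then
       let res := loopA minInks diff 0
       if res.2.2 > res.1.length ∧ res.2.1 ≠ 0 then "IMPOSSIBLE" else fmtA res.1
     else fmtA minInks) =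
    (let st := ([3, 2, 1, 0] : List Int).foldl
        (fun (st : List Int × Int) j =>
          let v := min (PySem.List.pyGetD [C, M, Y, K] j 0) st.2
          (st.1.set j.toNat v, st.2 - v))
        ([0, 0, 0, 0], inkSize)
     PySem.Str.join " " (st.1.map (fun v => PySem.Int.toStr v))) := by
  simp only []
  rw [show (([3, 2, 1, 0] : List Int).foldl
        (fun (st : List Int × Int) j =>
          let v := min (PySem.List.pyGetD [C, M, Y, K] j 0) st.2
          (st.1.set j.toNat v, st.2 - v))
        ([0, 0, 0, 0], inkSize)).1 = _ from foldB_eval C M Y K]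
  rw [fmt_join]
  by_cases hd : C + M + Y + K - inkSize = 0
  · rw [if_neg (by omega)]
    apply congrArg fmtA
    simp only [List.cons.injEq, and_true, inkSize] at *
    refine ⟨by omega, by omega, by omega, by omega⟩
  · rw [if_pos (by omega)]
    by_cases c1 : ¬ (C - (C + M + Y + K - inkSize) < 0)
    · rw [loopA_1 _ _ _ _ _ (by omega) c1]
      rw [if_neg (by simp)]
      apply congrArg fmtA
      simp only [List.cons.injEq, and_true, inkSize] at *
      refine ⟨by omega, by omega, by omega, by omega⟩
    · push Not at c1
      by_cases c2 : ¬ (M - ((C + M + Y + K - inkSize) - C) < 0)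
      · rw [loopA_2 _ _ _ _ _ (by omega) (by omega) c2]
        rw [if_neg (by simp)]
        apply congrArg fmtA
        simp only [List.cons.injEq, and_true, inkSize] at *
        refine ⟨by omega, by omega, by omega, by omega⟩
      · push Not at c2
        by_cases c3 : ¬ (Y - ((C + M + Y + K - inkSize) - C - M) < 0)
        · rw [loopA_3 _ _ _ _ _ (by omega) (by omega) (by omega) c3]
          rw [if_neg (by simp)]
          apply congrArg fmtA
          simp only [List.cons.injEq, and_true, inkSize] at *
          refine ⟨by omega, by omega, by omega, by omega⟩
        · push Not at c3
          rw [loopA_4 _ _ _ _ _ (by omega) (by omega) (by omega) (by omega)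
            (by simp only [inkSize] at *; omega)]
          rw [if_neg (by simp)]
          apply congrArg fmtA
          simp only [List.cons.injEq, and_true, inkSize] at *
          refine ⟨by omega, by omega, by omega, by omega⟩

theorem main_sum (C M Y K : Int) (hC : 0 ≤ C) (hM : 0 ≤ M) (hY : 0 ≤ Y) (hK : 0 ≤ K)
    (hS : inkSize ≤ [C, M, Y, K].sum) :
    (let minInks := [C, M, Y, K]
     let diff := minInks.sum - inkSize
     if diff ≠ 0 then
       let res := loopA minInks diff 0
       if res.2.2 > res.1.length ∧ res.2.1 ≠ 0 then "IMPOSSIBLE" else fmtA res.1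
     else fmtA minInks) =
    (let st := ([3, 2, 1, 0] : List Int).foldl
        (fun (st : List Int × Int) j =>
          let v := min (PySem.List.pyGetD [C, M, Y, K] j 0) st.2
          (st.1.set j.toNat v, st.2 - v))
        ([0, 0, 0, 0], inkSize)
     PySem.Str.join " " (st.1.map (fun v => PySem.Int.toStr v))) := by
  have hs : ([C, M, Y, K] : List Int).sum = C + M + Y + K := by simp; ring
  simp only [hs] at *
  exact main_core C M Y K hC hM hY hK hS

-- ===== VERDICT (by name: the statement is the Claim_ definition above) =====
theorem inkUsage_spec : Claim_equal_inkUsage := by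
  intro inks _ hpre
  unfold Spec_inkUsage
  by_cases hany : inks.any (fun r => r.sum < inkSize) = true
  · rw [inkUsage, inkUsage_alt, checkRowsA_eq_any, hany]; simp
  · have hb : (inks.any fun r => decide (r.sum < inkSize)) = false := by
      simpa using hany
    rcases hpre with h | ⟨hlen, hrows⟩
    · exfalso; apply hany; simp only [List.any_eq_true]
      obtain ⟨r, hr, hs⟩ := h; exact ⟨r, hr, by simpa [inkSize] using hs⟩
    · rcases inks with _ | ⟨r0, _ | ⟨r1, _ | ⟨r2, rest⟩⟩⟩ <;> simp at hlen
      simp only [List.take_succ_cons, List.take_zero, List.mem_cons, List.not_mem_nil,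
        or_false, forall_eq_or_imp, forall_eq] at hrows
      obtain ⟨⟨hl0, hn0⟩, ⟨hl1, hn1⟩, ⟨hl2, hn2⟩⟩ := hrows
      rcases r0 with _ | ⟨a0, _ | ⟨a1, _ | ⟨a2, _ | ⟨a3, t0⟩⟩⟩⟩ <;> simp at hl0
      rcases r1 with _ | ⟨b0, _ | ⟨b1, _ | ⟨b2, _ | ⟨b3, t1⟩⟩⟩⟩ <;> simp at hl1
      rcases r2 with _ | ⟨c0, _ | ⟨c1, _ | ⟨c2, _ | ⟨c3, t2⟩⟩⟩⟩ <;> simp at hl2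
      simp only [List.take_succ_cons, List.take_zero, List.mem_cons, List.not_mem_nil,
        or_false, forall_eq_or_imp, forall_eq] at hn0 hn1 hn2
      obtain ⟨ha0, ha1, ha2, ha3⟩ := hn0
      obtain ⟨hb0, hb1, hb2, hb3⟩ := hn1
      obtain ⟨hc0, hc1, hc2, hc3⟩ := hn2
      rw [inkUsage, inkUsage_alt, checkRowsA_eq_any]
      rw [hb]
      simp only [Bool.false_eq_true, if_false]
      have hrange : PySem.List.pyRange 0 4 1 = [0, 1, 2, 3] := by decide
      rw [hrange]
      simp only [List.map_cons, List.map_nil]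
      simp only [minColB, getA]
      simp only [pysem, List.getD_eq_getElem?_getD, List.getElem?_cons_succ,
        List.getElem?_cons_zero, Option.getD_some]
      by_cases ht : ([min (min a0 b0) c0, min (min a1 b1) c1, min (min a2 b2) c2,
          min (min a3 b3) c3] : List Int).sum < inkSize
      · rw [if_pos ht, if_pos ht]
      · rw [if_neg ht, if_neg ht]
        have := main_sum (min (min a0 b0) c0) (min (min a1 b1) c1) (min (min a2 b2) c2)
          (min (min a3 b3) c3) (by omega) (by omega) (by omega) (by omega) (by omega)
        simpa using this
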